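-- pv_equiv track=rewrite | github.com/ClutchShot/our | run.py | create_dataset_task1
-- ===== SOURCE A (Python) =====
-- def create_dataset_task1(all_ids: list, all_data:list, k: int):
--     dataset = dict()
--     remain = set(range(0, len(all_data) - 1))
--     size = int(len(all_data)/k)
--     i = 0
--     temp = []
--     for id in all_ids:
--         for j in remain:
--             if all_data[j][0]==id  or  all_data[j][1]==id:
--                 temp.append(j)
--         remain = remain.difference(temp)
--
--         if len(temp) > size:
--             dataset[i] = set(temp)
--             i+=1
--             temp.clear()
--             if (i==4):
--                 dataset[i]=remain
--                 return dataset
--     return dataset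
-- ===== SOURCE B (Python) =====
-- def create_dataset_task1(all_ids: list, all_data: list, k: int):
--     n = len(all_data)
--     size = int(n / k)
--     # value -> ascending list of row indices (over rows 0..n-2) whose first or
--     # second entry is that value; built once, so each id is answered by one lookup.
--     index_of = {}
--     for j in range(n - 1):
--         vals = all_data[j][:2]
--         if len(vals) == 2 and vals[0] == vals[1]:
--             vals = vals[:1]
--         for v in vals:
--             index_of[v] = index_of.get(v, []) + [j]
--     remain = set(range(n - 1))
--     dataset = {}
--     i = 0
--     temp = []
--     for id in all_ids:
--         new = [j for j in index_of.get(id, []) if j in remain]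
--         temp = temp + new
--         remain = remain - set(new)
--         if len(temp) > size:
--             dataset[i] = set(temp)
--             i += 1
--             temp = []
--             if i == 4:
--                 dataset[i] = remain
--                 return dataset
--     return dataset
-- ===== Notes on version B (the rewrite author's own statement) =====
-- stated objective: faster
-- what changed: Instead of rescanning the whole remaining index set for every id, B builds a value-to-row-indices map over the first two entries of each row once and answers each id by one lookup intersected with the remaining set.
-- outside the precondition, e.g. on create_dataset_task1([5], [[5], [0, 0]], 1): A returns {}, B returns {}
import Mathlib
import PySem

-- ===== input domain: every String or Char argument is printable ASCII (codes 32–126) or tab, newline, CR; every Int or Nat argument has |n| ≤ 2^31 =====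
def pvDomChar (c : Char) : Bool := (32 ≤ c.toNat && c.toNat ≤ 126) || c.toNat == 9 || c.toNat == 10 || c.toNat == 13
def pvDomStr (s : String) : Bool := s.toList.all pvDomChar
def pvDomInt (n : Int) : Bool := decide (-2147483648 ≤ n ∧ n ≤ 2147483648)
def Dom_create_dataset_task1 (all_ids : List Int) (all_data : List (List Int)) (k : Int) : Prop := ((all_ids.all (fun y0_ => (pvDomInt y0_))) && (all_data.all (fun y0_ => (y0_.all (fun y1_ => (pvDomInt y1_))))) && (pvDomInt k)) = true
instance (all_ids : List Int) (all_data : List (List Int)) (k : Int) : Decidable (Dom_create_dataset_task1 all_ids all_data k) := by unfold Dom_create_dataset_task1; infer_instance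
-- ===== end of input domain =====

-- B replaces A's inner scan of `remain` for every id by a value→row-indices map
-- built once, then intersects each lookup with `remain` (objective: faster).
-- The equivalence proved is about the RETURN value only (A mutates none of its arguments).

-- ===== PORT A =====
-- `all_data[j][0]==id or all_data[j][1]==id` (short-circuit; defaults unreachable under Pre_)
def pvMatchA (all_data : List (List Int)) (id : Int) (j : Int) : Bool :=
  PySem.List.pyGetD (PySem.List.pyGetD all_data j []) 0 0 == id ||
  PySem.List.pyGetD (PySem.List.pyGetD all_data j []) 1 0 == id

-- the `for id in all_ids` loop of A; state = (dataset, remain, i, temp)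
def pvLoopA (all_data : List (List Int)) (size : Int) :
    List Int → PySem.Dict Int (List Int) → PySem.Set Int → Int → List Int →
      PySem.Dict Int (List Int)
  | [], dataset, _, _, _ => dataset
  | id :: ids, dataset, remain, i, temp =>
    let temp := temp ++ remain.filter (fun j => pvMatchA all_data id j)
    let remain := PySem.Set.diff remain temp
    if (temp.length : Int) > size then
      let dataset := dataset.insert i (PySem.Set.ofList temp)
      let i := i + 1
      if i == 4 then dataset.insert i remain
      else pvLoopA all_data size ids dataset remain i []
    else pvLoopA all_data size ids dataset remain i temp

def create_dataset_task1 (all_ids : List Int) (all_data : List (List Int)) (k : Int) : List (Int × List Int) :=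
  let remain : PySem.Set Int := PySem.Set.ofList (PySem.List.pyRange 0 ((all_data.length : Int) - 1) 1)
  -- size = int(len(all_data)/k): float true division truncated toward zero; for a
  -- physical list length and |k| ≤ 2^31 this is exactly truncating integer division
  let size : Int := Int.tdiv (all_data.length : Int) k
  (pvLoopA all_data size all_ids PySem.Dict.empty remain 0 []).items

-- ===== PORT B =====
-- vals = row[:2], reduced to its first entry when both entries are equal
def pvIndexVals (row : List Int) : List Int :=
  let vals := PySem.List.slice row none (some 2)
  if vals.length == 2 && (vals.getD 0 0 == vals.getD 1 0)
  then PySem.List.slice vals none (some 1) else vals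

-- one row's contribution to index_of: append j to the list of each value of the row
def pvIndexStep (d : PySem.Dict Int (List Int)) (row : List Int) (j : Int) : PySem.Dict Int (List Int) :=
  (pvIndexVals row).foldl (fun d v => d.insert v (d.getD v [] ++ [j])) d

-- index_of: value -> ascending list of row indices j < n-1 with row[0]=v or row[1]=v
def pvIndexMap (all_data : List (List Int)) : PySem.Dict Int (List Int) :=
  (PySem.List.pyRange 0 ((all_data.length : Int) - 1) 1).foldl
    (fun d j => pvIndexStep d (PySem.List.pyGetD all_data j []) j)
    PySem.Dict.empty

-- the `for id in all_ids` loop of B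
def pvLoopB (ix : PySem.Dict Int (List Int)) (size : Int) :
    List Int → PySem.Dict Int (List Int) → PySem.Set Int → Int → List Int →
      PySem.Dict Int (List Int)
  | [], dataset, _, _, _ => dataset
  | id :: ids, dataset, remain, i, temp =>
    let new := (ix.getD id []).filter (fun j => remain.contains j)
    let temp := temp ++ new
    let remain := PySem.Set.diff remain new
    if (temp.length : Int) > size then
      let dataset := dataset.insert i (PySem.Set.ofList temp)
      let i := i + 1
      if i == 4 then dataset.insert i remain
      else pvLoopB ix size ids dataset remain i []
    else pvLoopB ix size ids dataset remain i temp

def create_dataset_task1_alt (all_ids : List Int) (all_data : List (List Int)) (k : Int) : List (Int × List Int) :=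
  let size : Int := Int.tdiv (all_data.length : Int) k
  let ix := pvIndexMap all_data
  let remain : PySem.Set Int := PySem.Set.ofList (PySem.List.pyRange 0 ((all_data.length : Int) - 1) 1)
  (pvLoopB ix size all_ids PySem.Dict.empty remain 0 []).items

-- ===== PRECONDITION & SPEC =====
-- Pre_ excludes k = 0 (A raises ZeroDivisionError) and, when ids are to be processed,
-- non-final rows with fewer than 2 entries, on which A in general raises IndexError
-- (it returns only in the corner where every short row's first entry equals the first id).
def Pre_create_dataset_task1 (all_ids : List Int) (all_data : List (List Int)) (k : Int) : Prop :=
  k ≠ 0 ∧ (all_ids = [] ∨ ∀ row ∈ all_data.dropLast, 2 ≤ row.length)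
instance (all_ids : List Int) (all_data : List (List Int)) (k : Int) : Decidable (Pre_create_dataset_task1 all_ids all_data k) := by unfold Pre_create_dataset_task1; infer_instance

def pvWitness_create_dataset_task1 : List Int × List (List Int) × Int :=
  ([1, 2], [[1, 3], [2, 1], [2, 2], [5, 5]], 2)

def Spec_create_dataset_task1 (all_ids : List Int) (all_data : List (List Int)) (k : Int) (out : List (Int × List Int)) : Prop := out = create_dataset_task1_alt all_ids all_data k
instance (all_ids : List Int) (all_data : List (List Int)) (k : Int) (out : List (Int × List Int)) : Decidable (Spec_create_dataset_task1 all_ids all_data k out) := by unfold Spec_create_dataset_task1; infer_instance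

-- ===== CLAIM (what is proved, stated in full; the proofs are below) =====
def Claim_equal_create_dataset_task1 : Prop := ∀ (all_ids : List Int) (all_data : List (List Int)) (k : Int), Dom_create_dataset_task1 all_ids all_data k → Pre_create_dataset_task1 all_ids all_data k → Spec_create_dataset_task1 all_ids all_data k (create_dataset_task1 all_ids all_data k)

-- ===== LEMMAS AND PROOFS =====

-- a sublist of a Nodup list is recovered by filtering for membership
theorem pv_filter_contains_of_sublist {R l : List Int} (hnd : R.Nodup) (hs : List.Sublist l R) :
    R.filter (fun x => l.contains x) = l := by
  induction hs with
  | slnil => simp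
  | cons r h ih =>
    rename_i l' R'
    rw [List.nodup_cons] at hnd
    have hrl : l'.contains r = false := by
      by_contra hc
      exact hnd.1 (h.subset (by simpa using hc))
    rw [List.filter_cons, hrl]
    simpa using ih hnd.2
  | cons₂ r h ih =>
    rename_i l' R'
    rw [List.nodup_cons] at hnd
    have hstep : R'.filter (fun x => (r :: l').contains x) = R'.filter (fun x => l'.contains x) := by
      refine List.filter_congr (fun x hx => ?_)
      have hxr : x ≠ r := fun he => hnd.1 (he ▸ hx)
      simp [hxr]
    rw [List.filter_cons]
    have hcr : (r :: l').contains r = true := by simp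
    rw [hcr, if_pos rfl, hstep, ih hnd.2]

-- symmetric intersection: two sublists of one Nodup list intersect in the same order
theorem pv_filter_comm {R s t : List Int} (hnd : R.Nodup) (hs : List.Sublist s R) (ht : List.Sublist t R) :
    s.filter (fun x => t.contains x) = t.filter (fun x => s.contains x) := by
  conv_lhs => rw [← pv_filter_contains_of_sublist hnd hs]
  conv_rhs => rw [← pv_filter_contains_of_sublist hnd ht]
  rw [List.filter_filter, List.filter_filter]
  exact List.filter_congr (fun x _ => Bool.and_comm _ _)

-- the dedup of a row's first two entries
theorem pv_vals_eq (v0 v1 : Int) (rest : List Int) :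
    pvIndexVals (v0 :: v1 :: rest) = if v0 = v1 then [v0] else [v0, v1] := by
  have h2 : PySem.List.slice (v0 :: v1 :: rest) none (some 2) = [v0, v1] := by
    rw [PySem.List.slice_to _ (by norm_num)]; simp
  have h1 : PySem.List.slice [v0, v1] none (some 1) = [v0] := by
    rw [PySem.List.slice_to _ (by norm_num)]; simp
  simp only [pvIndexVals, h2, h1]
  by_cases hvv : v0 = v1
  · simp [hvv]
  · simp [hvv]

-- one row's inserts extend exactly the lists of the values that match that row
theorem pv_indexStep_getD (d : PySem.Dict Int (List Int)) (v0 v1 : Int) (rest : List Int)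
    (j id : Int) :
    (pvIndexStep d (v0 :: v1 :: rest) j).getD id []
      = d.getD id [] ++ (if v0 == id || v1 == id then [j] else []) := by
  unfold pvIndexStep
  rw [pv_vals_eq]
  by_cases hvv : v0 = v1
  · subst hvv
    rw [if_pos rfl]
    simp only [List.foldl_cons, List.foldl_nil]
    rw [PySem.Dict.getD_insert]
    by_cases hid : id = v0
    · subst hid; simp
    · simp [hid, Ne.symm hid]
  · rw [if_neg hvv]
    simp only [List.foldl_cons, List.foldl_nil]
    rw [PySem.Dict.getD_insert]
    by_cases hid1 : id = v1
    · subst hid1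
      rw [if_pos rfl, PySem.Dict.getD_insert, if_neg (fun h => hvv h.symm)]
      simp
    · rw [if_neg hid1, PySem.Dict.getD_insert]
      by_cases hid0 : id = v0
      · subst hid0; simp
      · simp [hid0, Ne.symm hid0, Ne.symm hid1]

theorem pv_index_fold_getD (all_data : List (List Int)) (id : Int) :
    ∀ (js : List Int) (d : PySem.Dict Int (List Int)),
      (∀ j ∈ js, 2 ≤ (PySem.List.pyGetD all_data j []).length) →
      (js.foldl (fun d j => pvIndexStep d (PySem.List.pyGetD all_data j []) j) d).getD id []
        = d.getD id [] ++ js.filter (pvMatchA all_data id) := by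
  intro js
  induction js with
  | nil => intro d _; simp
  | cons j js ih =>
    intro d hjs
    have hlen := hjs j (by simp)
    obtain ⟨v0, v1, rest, hre⟩ :
        ∃ v0 v1 rest, PySem.List.pyGetD all_data j [] = v0 :: v1 :: rest := by
      rcases hr : PySem.List.pyGetD all_data j [] with _ | ⟨a, _ | ⟨b, r⟩⟩
      · rw [hr] at hlen; simp at hlen
      · rw [hr] at hlen; simp at hlen
      · exact ⟨a, b, r, rfl⟩
    have hmatch : pvMatchA all_data id j = (v0 == id || v1 == id) := by
      have h1 : PySem.List.pyGetD (v0 :: v1 :: rest) 1 0 = v1 := by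
        rw [show (1 : Int) = ((1 : Nat) : Int) by rfl, PySem.List.pyGetD_natCast]; rfl
      simp [pvMatchA, hre, h1]
    simp only [List.foldl_cons, List.filter_cons]
    rw [ih _ (fun x hx => hjs x (by simp [hx]))]
    rw [hre, pv_indexStep_getD, ← hmatch]
    cases hm : pvMatchA all_data id j <;> simp

-- characterization of the index map: lookup of id = the matching indices of range(n-1), in order
theorem pv_indexMap_getD (all_data : List (List Int))
    (hrows : ∀ row ∈ all_data.dropLast, 2 ≤ row.length) (id : Int) :
    (pvIndexMap all_data).getD id []
      = (PySem.List.pyRange 0 ((all_data.length : Int) - 1) 1).filter (pvMatchA all_data id) := by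
  unfold pvIndexMap
  rw [pv_index_fold_getD]
  · simp
  · intro j hj
    rw [PySem.List.mem_pyRange_one] at hj
    have hget : PySem.List.pyGetD all_data j [] = all_data[j.toNat] := by
      rw [PySem.List.pyGetD_eq_getElem _ _ hj.1 (by omega)]
    have hlt : j.toNat < all_data.dropLast.length := by
      rw [List.length_dropLast]; omega
    have he : all_data.dropLast[j.toNat] = all_data[j.toNat] := List.getElem_dropLast hlt
    rw [hget, ← he]
    exact hrows _ (List.getElem_mem hlt)

-- main loop simulation: with the index map characterized, the two loops agree
theorem pv_loop_eq (all_data : List (List Int)) (size : Int)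
    (ix : PySem.Dict Int (List Int)) (R : List Int) (hnd : R.Nodup)
    (hix : ∀ id, ix.getD id [] = R.filter (pvMatchA all_data id)) :
    ∀ (ids : List Int) (dataset : PySem.Dict Int (List Int)) (remain : PySem.Set Int)
      (i : Int) (temp : List Int),
      List.Sublist remain R → (∀ x ∈ temp, x ∉ remain) →
      pvLoopA all_data size ids dataset remain i temp
        = pvLoopB ix size ids dataset remain i temp := by
  intro ids
  induction ids with
  | nil => intro _ _ _ _ _ _; rfl
  | cons id ids ih =>
    intro dataset remain i temp hrem htemp
    rw [pvLoopA, pvLoopB]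
    have hnew : remain.filter (fun j => pvMatchA all_data id j)
        = (ix.getD id []).filter (fun j => remain.contains j) := by
      rw [hix id]
      have h1 : remain.filter (fun j => pvMatchA all_data id j)
          = remain.filter (fun j => (R.filter (pvMatchA all_data id)).contains j) := by
        refine List.filter_congr (fun j hj => ?_)
        have hjR : j ∈ R := hrem.subset hj
        by_cases hm : pvMatchA all_data id j
        · simp [hm, List.mem_filter, hjR]
        · simp only [Bool.not_eq_true] at hm
          simp [hm, List.mem_filter]
      rw [h1]
      exact pv_filter_comm hnd hrem (List.filter_sublist)
    set new := remain.filter (fun j => pvMatchA all_data id j) with hnewdef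
    have hnewsub : ∀ x ∈ new, x ∈ remain := by
      intro x hx
      exact List.mem_of_mem_filter (hnewdef ▸ hx)
    have hdiff : PySem.Set.diff remain (temp ++ new) = PySem.Set.diff remain new := by
      unfold PySem.Set.diff
      refine List.filter_congr (fun x hx => ?_)
      have hxt : x ∉ temp := fun hxm => htemp x hxm hx
      simp [PySem.Set.contains, List.mem_append, hxt]
    have hrem' : List.Sublist (PySem.Set.diff remain new) R :=
      (List.filter_sublist).trans hrem
    have htemp' : ∀ x ∈ temp ++ new, x ∉ PySem.Set.diff remain new := by
      intro x hx hmem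
      have hmem' : x ∈ remain ∧ x ∉ new := by
        have := hmem
        unfold PySem.Set.diff at this
        rw [List.mem_filter] at this
        exact ⟨this.1, by simpa [PySem.Set.contains] using this.2⟩
      rcases List.mem_append.mp hx with h | h
      · exact htemp x h hmem'.1
      · exact hmem'.2 h
    simp only [← hnew, hdiff]
    by_cases hsize : ((temp ++ new).length : Int) > size
    · rw [if_pos hsize, if_pos hsize]
      by_cases h4 : (i + 1) == 4
      · rw [if_pos h4, if_pos h4]
      · rw [if_neg h4, if_neg h4]
        exact ih _ _ _ _ hrem' (by intro x hx; simp at hx)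
    · rw [if_neg hsize, if_neg hsize]
      exact ih _ _ _ _ hrem' htemp'

-- ===== VERDICT (by name: the statement is the Claim_ definition above) =====
theorem create_dataset_task1_spec : Claim_equal_create_dataset_task1 := by
  intro all_ids all_data k _ hpre
  unfold Spec_create_dataset_task1 create_dataset_task1 create_dataset_task1_alt
  rcases hpre.2 with hids | hrows
  · subst hids; rfl
  · show (pvLoopA all_data ((all_data.length : Int).tdiv k) all_ids PySem.Dict.empty
        (PySem.Set.ofList (PySem.List.pyRange 0 ((all_data.length : Int) - 1) 1)) 0 []).items
      = (pvLoopB (pvIndexMap all_data) ((all_data.length : Int).tdiv k) all_ids PySem.Dict.empty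
        (PySem.Set.ofList (PySem.List.pyRange 0 ((all_data.length : Int) - 1) 1)) 0 []).items
    rw [PySem.Set.ofList_eq_self_of_nodup _ (PySem.List.nodup_pyRange_one _ _)]
    exact congrArg PySem.Dict.items
      (pv_loop_eq all_data _ _ _ (PySem.List.nodup_pyRange_one _ _)
        (fun id => pv_indexMap_getD all_data hrows id) all_ids _ _ 0 []
        (List.Sublist.refl _) (by intro x hx; simp at hx))
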